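-- pv_equiv track=rewrite | github.com/ramseylab/cerenkov | feature_extraction/genome_browser_tool.py | __bin_from_range_standard
-- ===== SOURCE A (Python) =====
-- binOffsets = [512+64+8+1, 64+8+1, 8+1, 1, 0]
--
-- _binFirstShift = 17  # How much to shift to get to finest bin.
--
-- _binNextShift = 3  # How much to shift to get to next larger bin.
--
-- def __bin_from_range_standard(start, end):
--     """
--     Given start,end in chromosome coordinates, assign it a bin.
--     There's a bin for each 128k segment, for each 1M segment, for each 8M segment, for each 64M segment,
--     and for each chromosome (which is assumed to be less than 512M.)
--     A range goes into the smallest bin it will fit in./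
--     """
--
--     start_bin = start
--     end_bin = end-1
--     start_bin >>= _binFirstShift
--     end_bin >>= _binFirstShift
--
--     for i in range(0, len(binOffsets)):
--         if start_bin == end_bin:
--             return binOffsets[i] + start_bin
--         start_bin >>= _binNextShift
--         end_bin >>= _binNextShift
--
--     raise ValueError("start {}, end {} out of range in findBin (max is 512M)".format(start, end))
-- ===== SOURCE B (Python) =====
-- def __bin_from_range_standard(start, end):
--     """Top-down recursive descent of the UCSC bin tree: start at the
--     chromosome-level node and descend into a child as long as start and
--     end-1 fall into the same child; the level offset is rebuilt on the way
--     down by the recurrence offset*8 + 1 (no binOffsets table, no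
--     bottom-up shift loop)."""
--     s = start >> 17
--     e = (end - 1) >> 17
--     if (s >> 12) != (e >> 12):
--         raise ValueError("start {}, end {} out of range in findBin (max is 512M)".format(start, end))
--
--     def descend(level, offset, node):
--         if level == 0 or (s >> (3 * (level - 1))) != (e >> (3 * (level - 1))):
--             return offset + node
--         return descend(level - 1, offset * 8 + 1, s >> (3 * (level - 1)))
--
--     return descend(4, 0, s >> 12)
-- ===== Notes on version B (the rewrite author's own statement) =====
-- stated objective: alternative
-- what changed: B replaces A's bottom-up loop over the binOffsets table (shift both bins by 3 each iteration until they match) by a top-down recursive descent of the bin tree that descends while start and end-1 share a child, rebuilding the level offset on the way down by the recurrence offset*8+1 instead of reading a table.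
import Mathlib
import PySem

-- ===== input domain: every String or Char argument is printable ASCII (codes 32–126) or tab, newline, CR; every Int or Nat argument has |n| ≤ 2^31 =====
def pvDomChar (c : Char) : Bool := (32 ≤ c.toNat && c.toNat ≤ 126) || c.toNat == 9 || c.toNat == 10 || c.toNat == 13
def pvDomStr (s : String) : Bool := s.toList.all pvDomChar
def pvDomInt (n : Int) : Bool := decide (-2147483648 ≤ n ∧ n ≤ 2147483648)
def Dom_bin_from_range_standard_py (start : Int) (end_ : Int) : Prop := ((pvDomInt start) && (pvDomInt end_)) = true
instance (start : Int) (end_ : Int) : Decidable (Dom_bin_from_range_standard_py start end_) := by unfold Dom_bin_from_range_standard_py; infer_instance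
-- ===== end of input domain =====

-- B replaces A's bottom-up table loop by a top-down recursive descent of the bin tree,
-- rebuilding the level offset by offset*8+1 (objective: alternative, same cost).

-- ===== PORT A =====
def pvBinOffsets : List Int := [512+64+8+1, 64+8+1, 8+1, 1, 0]

-- the 'for i in range(0, len(binOffsets))' loop: structural recursion over binOffsets,
-- shifting both bins by _binNextShift = 3 each iteration; 'none' is the ValueError fall-through
def pvFindBin : List Int → Int → Int → Option Int
  | [], _, _ => none
  | o :: rest, sb, eb =>
      if sb = eb then some (o + sb) else pvFindBin rest (sb >>> (3:Nat)) (eb >>> (3:Nat))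

def bin_from_range_standard_py (start : Int) (end_ : Int) : Int :=
  -- '.getD 0' stands for the ValueError branch, which Pre_ excludes
  (pvFindBin pvBinOffsets (start >>> (17:Nat)) ((end_ - 1) >>> (17:Nat))).getD 0

-- ===== PORT B =====
-- Source B's inner 'descend(level, offset, node)': countdown recursion on the level,
-- descending while start and end-1 fall into the same child
def pvDescend (s e : Int) : Nat → Int → Int → Int
  | 0, offset, node => offset + node
  | l + 1, offset, node =>
      if s >>> (3 * l) ≠ e >>> (3 * l) then offset + node
      else pvDescend s e l (offset * 8 + 1) (s >>> (3 * l))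

def bin_from_range_standard_py_alt (start : Int) (end_ : Int) : Int :=
  let s := start >>> (17:Nat)
  let e := (end_ - 1) >>> (17:Nat)
  if s >>> (12:Nat) ≠ e >>> (12:Nat) then 0  -- Source B raises ValueError here; excluded by Pre_
  else pvDescend s e 4 0 (s >>> (12:Nat))

-- ===== PRECONDITION & SPEC =====
-- Pre_ excludes exactly the inputs on which A raises ValueError (a range wider than the
-- coarsest 64M bin level): A returns iff start and end-1 agree from bit 29 upward.
def Pre_bin_from_range_standard_py (start : Int) (end_ : Int) : Prop :=
  start >>> (29:Nat) = (end_ - 1) >>> (29:Nat)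
instance (start : Int) (end_ : Int) : Decidable (Pre_bin_from_range_standard_py start end_) := by
  unfold Pre_bin_from_range_standard_py; infer_instance

def pvWitness_bin_from_range_standard_py : Int × Int := (0, 1)

def Spec_bin_from_range_standard_py (start : Int) (end_ : Int) (out : Int) : Prop := out = bin_from_range_standard_py_alt start end_
instance (start : Int) (end_ : Int) (out : Int) : Decidable (Spec_bin_from_range_standard_py start end_ out) := by unfold Spec_bin_from_range_standard_py; infer_instance

-- ===== CLAIM (what is proved, stated in full; the proofs are below) =====
def Claim_equal_bin_from_range_standard_py : Prop := ∀ (start : Int) (end_ : Int), Dom_bin_from_range_standard_py start end_ → Pre_bin_from_range_standard_py start end_ → Spec_bin_from_range_standard_py start end_ (bin_from_range_standard_py start end_)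

-- ===== LEMMAS AND PROOFS =====

theorem pvIntShiftShift (c : Int) (i j : Nat) : c >>> i >>> j = c >>> (i + j) := by
  cases c with
  | ofNat m => show Int.ofNat (m >>> i >>> j) = Int.ofNat (m >>> (i + j))
               rw [Nat.shiftRight_add]
  | negSucc m => show Int.negSucc (m >>> i >>> j) = Int.negSucc (m >>> (i + j))
                 rw [Nat.shiftRight_add]

-- equality of shifted values is preserved by shifting further
theorem pvShiftMono (s e : Int) (i j : Nat) (h : s >>> i = e >>> i) :
    s >>> (i + j) = e >>> (i + j) := by
  rw [← pvIntShiftShift, ← pvIntShiftShift, h]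

-- ===== VERDICT (by name: the statement is the Claim_ definition above) =====
theorem bin_from_range_standard_py_spec : Claim_equal_bin_from_range_standard_py := by
  intro start end_ _ hpre
  unfold Spec_bin_from_range_standard_py bin_from_range_standard_py bin_from_range_standard_py_alt
  unfold Pre_bin_from_range_standard_py at hpre
  set S := start >>> (17:Nat) with hS
  set E := (end_ - 1) >>> (17:Nat) with hE
  have h12 : S >>> (12:Nat) = E >>> (12:Nat) := by
    rw [hS, hE, pvIntShiftShift, pvIntShiftShift]; exact hpre
  simp only [pvFindBin, pvBinOffsets, pvDescend, pvIntShiftShift]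
  norm_num only
  have m0_3 : S = E → S >>> (3:Nat) = E >>> (3:Nat) := fun h => by rw [h]
  have m3_6 : S >>> (3:Nat) = E >>> (3:Nat) → S >>> (6:Nat) = E >>> (6:Nat) :=
    fun h => pvShiftMono S E 3 3 h
  have m6_9 : S >>> (6:Nat) = E >>> (6:Nat) → S >>> (9:Nat) = E >>> (9:Nat) :=
    fun h => pvShiftMono S E 6 3 h
  have m9_12 : S >>> (9:Nat) = E >>> (9:Nat) → S >>> (12:Nat) = E >>> (12:Nat) :=
    fun h => pvShiftMono S E 9 3 h
  split_ifs <;> simp_all
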